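-- pv_equiv track=rewrite | github.com/SamimiesGames/itslearning | osa-4/6/arvosanatilasto.py | parse_points
-- ===== SOURCE A (Python) =====
-- GRADES = [
--     (28, 30, 5),
--     (24, 27, 4),
--     (21, 23, 3),
--     (18, 20, 2),
--     (15, 17, 1),
--     (0, 14, 0)
-- ]
--
-- def get_grade(summed):
--     for low, high, grade in GRADES:
--         if low <= summed <= high:
--             return grade
--
-- def parse_points(points):
--     grades = []
--
--     for test_points, practice_points in points:
--         if not test_points < 10:
--             grades.append(get_grade(test_points + practice_points))
--
--         else:
--             grades.append(0)
--
--     return grades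
-- ===== SOURCE B (Python) =====
-- # B computes the grade arithmetically: count how many cutoff scores the sum reaches,
-- # instead of scanning (low, high, grade) ranges.
-- CUTOFFS = (15, 18, 21, 24, 28)
--
-- def parse_points(points):
--     return [0 if t < 10 else sum(t + p >= c for c in CUTOFFS) for t, p in points]
-- ===== Notes on version B (the rewrite author's own statement) =====
-- stated objective: alternative
-- what changed: replaces the (low, high, grade) range table and its per-element scan (get_grade) by an arithmetic formula: the grade is the count of band cutoffs (15,18,21,24,28) that the point sum reaches
-- outside the precondition, e.g. on parse_points([(10, 25)]): A returns [None], B returns [5]; on parse_points([(10, -15)]): A returns [None], B returns [0]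
import Mathlib
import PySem

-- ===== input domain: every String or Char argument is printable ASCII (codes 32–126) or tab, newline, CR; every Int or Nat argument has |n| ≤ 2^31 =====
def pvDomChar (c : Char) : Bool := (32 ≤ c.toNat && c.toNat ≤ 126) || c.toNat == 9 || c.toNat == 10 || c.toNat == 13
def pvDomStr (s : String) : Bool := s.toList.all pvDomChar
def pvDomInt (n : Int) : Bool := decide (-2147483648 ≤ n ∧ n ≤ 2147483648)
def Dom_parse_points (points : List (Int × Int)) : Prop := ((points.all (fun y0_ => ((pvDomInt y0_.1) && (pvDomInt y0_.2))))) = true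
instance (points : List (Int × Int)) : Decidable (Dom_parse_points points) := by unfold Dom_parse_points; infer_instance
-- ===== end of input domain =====

-- ===== PORT A =====

-- B replaces the range-table scan by counting how many band cutoffs the point sum reaches.
-- ===== PORT A =====
def gradesTable : List (Int × Int × Int) :=
  [(28, 30, 5), (24, 27, 4), (21, 23, 3), (18, 20, 2), (15, 17, 1), (0, 14, 0)]

-- get_grade: scan GRADES; falls off the end → Python None (ported as Option).
def get_grade_loop (summed : Int) : List (Int × Int × Int) → Option Int
  | [] => none
  | (low, high, grade) :: rest =>
      if low ≤ summed ∧ summed ≤ high then some grade else get_grade_loop summed rest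

def get_grade (summed : Int) : Option Int := get_grade_loop summed gradesTable

-- Python appends get_grade's result (possibly None); Pre_ keeps inputs where it is a value,
-- so '.getD 0' is never the value actually claimed about.
def parse_points (points : List (Int × Int)) : List Int :=
  points.foldl
    (fun grades tp =>
      if ¬ tp.1 < 10 then grades ++ [(get_grade (tp.1 + tp.2)).getD 0]
      else grades ++ [0])
    []

-- ===== PORT B =====
def cutoffs : List Int := [15, 18, 21, 24, 28]

-- grade = number of cutoffs the sum reaches (sum of booleans in Source B)
def parse_points_alt (points : List (Int × Int)) : List Int :=
  points.map (fun tp =>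
    if tp.1 < 10 then 0
    else cutoffs.foldl (fun acc c => acc + (if tp.1 + tp.2 ≥ c then 1 else 0)) 0)

-- ===== PRECONDITION & SPEC =====
-- Pre_ excludes pairs with test_points ≥ 10 whose sum lies outside 0..30: there Python A's
-- get_grade returns None, which is not an Int, so A's list is not a List Int.
def Pre_parse_points (points : List (Int × Int)) : Prop :=
  ∀ tp ∈ points, tp.1 < 10 ∨ (0 ≤ tp.1 + tp.2 ∧ tp.1 + tp.2 ≤ 30)
instance (points : List (Int × Int)) : Decidable (Pre_parse_points points) := by
  unfold Pre_parse_points; infer_instance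

def pvWitness_parse_points : (List (Int × Int)) := [(5, 100), (10, 17), (28, 2), (12, -3)]

def Spec_parse_points (points : List (Int × Int)) (out : List Int) : Prop := out = parse_points_alt points
instance (points : List (Int × Int)) (out : List Int) : Decidable (Spec_parse_points points out) := by
  unfold Spec_parse_points; infer_instance

-- ===== CLAIM =====
def Claim_equal_parse_points : Prop :=
  ∀ (points : List (Int × Int)), Dom_parse_points points → Pre_parse_points points →
    Spec_parse_points points (parse_points points)

-- ===== LEMMAS AND PROOFS =====

-- pointwise agreement of the range scan and the cutoff count on the admitted sums
theorem grade_agree (s : Int) (h0 : 0 ≤ s) (h1 : s ≤ 30) :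
    (get_grade s).getD 0
      = cutoffs.foldl (fun acc c => acc + (if s ≥ c then 1 else 0)) 0 := by
  interval_cases s <;> decide

theorem parse_points_fold (points : List (Int × Int)) (acc : List Int)
    (hpre : ∀ tp ∈ points, tp.1 < 10 ∨ (0 ≤ tp.1 + tp.2 ∧ tp.1 + tp.2 ≤ 30)) :
    points.foldl
      (fun grades tp =>
        if ¬ tp.1 < 10 then grades ++ [(get_grade (tp.1 + tp.2)).getD 0]
        else grades ++ [0]) acc
    = acc ++ points.map (fun tp =>
        if tp.1 < 10 then 0
        else cutoffs.foldl (fun a c => a + (if tp.1 + tp.2 ≥ c then 1 else 0)) 0) := by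
  induction points generalizing acc with
  | nil => simp
  | cons tp rest ih =>
    have htp := hpre tp (List.mem_cons_self ..)
    have hrest : ∀ tp ∈ rest, tp.1 < 10 ∨ (0 ≤ tp.1 + tp.2 ∧ tp.1 + tp.2 ≤ 30) :=
      fun x hx => hpre x (List.mem_cons_of_mem _ hx)
    simp only [List.foldl_cons, List.map_cons, ih _ hrest]
    by_cases h : tp.1 < 10
    · simp [h]
    · have hs : 0 ≤ tp.1 + tp.2 ∧ tp.1 + tp.2 ≤ 30 := by
        rcases htp with h' | h' ; · omega
        · exact h'
      simp [h, grade_agree _ hs.1 hs.2]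

-- ===== VERDICT =====
theorem parse_points_spec : Claim_equal_parse_points := by
  intro points _ hpre
  unfold Spec_parse_points parse_points parse_points_alt
  simpa using parse_points_fold points [] hpre
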